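-- pv_equiv track=rewrite | github.com/asifhussain60/CORTEX | src/cortex_agents/test_generator/edge_case_analyzer.py | _infer_type_from_name
-- ===== SOURCE A (Python) =====
-- from typing import List, Dict, Any, Optional
--
-- def _infer_type_from_name(param_name: str) -> Optional[str]:
--     """Infer parameter type from name."""
--     name_lower = param_name.lower()
--
--     # Common naming patterns
--     if any(word in name_lower for word in ["count", "num", "size", "length", "total"]):
--         return "int"
--     elif any(word in name_lower for word in ["price", "amount", "rate", "percent"]):
--         return "float"
--     elif any(word in name_lower for word in ["name", "text", "message", "description"]):
--         return "str"
--     elif any(word in name_lower for word in ["items", "list", "collection"]):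
--         return "list"
--     elif any(word in name_lower for word in ["data", "config", "mapping"]):
--         return "dict"
--     elif any(word in name_lower for word in ["enabled", "active", "is_", "has_"]):
--         return "bool"
--
--     return None
-- ===== SOURCE B (Python) =====
-- # Position-driven multi-pattern scan: walk the name once by position, collect ALL
-- # matching types into a set via a word->type map, then select by priority order.
-- _WORD_TYPE = {
--     "count": "int", "num": "int", "size": "int", "length": "int", "total": "int",
--     "price": "float", "amount": "float", "rate": "float", "percent": "float",
--     "name": "str", "text": "str", "message": "str", "description": "str",
--     "items": "list", "list": "list", "collection": "list",
--     "data": "dict", "config": "dict", "mapping": "dict",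
--     "enabled": "bool", "active": "bool", "is_": "bool", "has_": "bool",
-- }
-- _TYPE_ORDER = ["int", "float", "str", "list", "dict", "bool"]
--
-- def _infer_type_from_name(param_name):
--     """Infer parameter type from name."""
--     name_lower = param_name.lower()
--     matched = set()
--     for i in range(len(name_lower)):
--         for word, typ in _WORD_TYPE.items():
--             if name_lower.startswith(word, i):
--                 matched.add(typ)
--     for typ in _TYPE_ORDER:
--         if typ in matched:
--             return typ
--     return None
-- ===== Notes on version B (the rewrite author's own statement) =====
-- stated objective: alternative
-- what changed: Replaces A's rule-by-rule substring-containment if/elif chain with a position-driven multi-pattern scan: walk the lowercased name once by index, test every keyword of a word-to-type map as a prefix at each position, collect all matching types into a set, then return the highest-priority matched type.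
import Mathlib
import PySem

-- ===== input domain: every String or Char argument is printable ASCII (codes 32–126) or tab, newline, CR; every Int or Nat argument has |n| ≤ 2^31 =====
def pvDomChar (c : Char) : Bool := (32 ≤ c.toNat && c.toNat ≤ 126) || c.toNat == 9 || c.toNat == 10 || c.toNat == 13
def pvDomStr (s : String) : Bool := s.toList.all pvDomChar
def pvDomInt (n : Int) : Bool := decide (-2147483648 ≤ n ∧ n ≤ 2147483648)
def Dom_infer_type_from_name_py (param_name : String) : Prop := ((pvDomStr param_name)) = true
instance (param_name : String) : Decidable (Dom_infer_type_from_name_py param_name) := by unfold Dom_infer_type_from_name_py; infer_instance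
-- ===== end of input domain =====

-- B replaces A's rule-by-rule containment chain with a position-driven multi-pattern
-- scan collecting all matching types into a set, then a priority pick (alternative; same result).

-- ===== PORT A =====
def infer_type_from_name_py (param_name : String) : Option String :=
  let name_lower := PySem.Str.lower param_name
  if ["count", "num", "size", "length", "total"].any (fun w => PySem.Str.isIn w name_lower) then
    some "int"
  else if ["price", "amount", "rate", "percent"].any (fun w => PySem.Str.isIn w name_lower) then
    some "float"
  else if ["name", "text", "message", "description"].any (fun w => PySem.Str.isIn w name_lower) then
    some "str"
  else if ["items", "list", "collection"].any (fun w => PySem.Str.isIn w name_lower) then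
    some "list"
  else if ["data", "config", "mapping"].any (fun w => PySem.Str.isIn w name_lower) then
    some "dict"
  else if ["enabled", "active", "is_", "has_"].any (fun w => PySem.Str.isIn w name_lower) then
    some "bool"
  else
    none

-- ===== PORT B =====
-- the _WORD_TYPE dict as an association list in insertion order (all keys distinct)
def pvWordType : List (String × String) :=
  [("count", "int"), ("num", "int"), ("size", "int"), ("length", "int"), ("total", "int"),
   ("price", "float"), ("amount", "float"), ("rate", "float"), ("percent", "float"),
   ("name", "str"), ("text", "str"), ("message", "str"), ("description", "str"),
   ("items", "list"), ("list", "list"), ("collection", "list"),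
   ("data", "dict"), ("config", "dict"), ("mapping", "dict"),
   ("enabled", "bool"), ("active", "bool"), ("is_", "bool"), ("has_", "bool")]

def pvTypeOrder : List String := ["int", "float", "str", "list", "dict", "bool"]

-- inner loop body: for word, typ in _WORD_TYPE.items(): if name_lower.startswith(word, i): matched.add(typ)
-- (i comes from range(len(name_lower)), so 0 ≤ i ≤ len and startswith(word, i) is exactly a prefix test on List.drop i.toNat)
def pvScanAt (s : List Char) (m : PySem.Set String) (i : Int) : PySem.Set String :=
  pvWordType.foldl
    (fun m wt => if PySem.Chars.startswith (s.drop i.toNat) wt.1.toList then PySem.Set.add m wt.2 else m) m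

-- final loop: first type of _TYPE_ORDER that is in matched
def pvPick (m : PySem.Set String) : List String → Option String
  | [] => none
  | t :: rest => if PySem.Set.contains m t then some t else pvPick m rest

def infer_type_from_name_py_alt (param_name : String) : Option String :=
  let s := (PySem.Str.lower param_name).toList
  let matched := (PySem.List.pyRange 0 s.length 1).foldl (pvScanAt s) PySem.Set.empty
  pvPick matched pvTypeOrder

-- ===== PRECONDITION & SPEC =====
def Spec_infer_type_from_name_py (param_name : String) (out : Option String) : Prop := out = infer_type_from_name_py_alt param_name
instance (param_name : String) (out : Option String) : Decidable (Spec_infer_type_from_name_py param_name out) := by unfold Spec_infer_type_from_name_py; infer_instance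

-- ===== CLAIM (what is proved, stated in full; the proofs are below) =====
def Claim_equal_infer_type_from_name_py : Prop := ∀ (param_name : String), Dom_infer_type_from_name_py param_name → Spec_infer_type_from_name_py param_name (infer_type_from_name_py param_name)

-- ===== LEMMAS AND PROOFS =====

-- generic: membership after a fold that conditionally adds wt.2
theorem mem_foldl_add_if (L : List (String × String)) (p : String × String → Bool)
    (m : PySem.Set String) (t : String) :
    t ∈ L.foldl (fun m wt => if p wt then PySem.Set.add m wt.2 else m) m ↔
      t ∈ m ∨ ∃ wt ∈ L, p wt = true ∧ wt.2 = t := by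
  induction L generalizing m with
  | nil => simp
  | cons hd tl ih =>
    simp only [List.foldl_cons, List.mem_cons]
    by_cases hp : p hd = true <;>
      simp only [hp, if_true, if_false, Bool.false_eq_true, ih, PySem.Set.mem_add] <;>
      aesop

-- membership after the inner fold over the word table
theorem mem_pvScanAt (s : List Char) (m : PySem.Set String) (i : Int) (t : String) :
    t ∈ pvScanAt s m i ↔
      t ∈ m ∨ ∃ wt ∈ pvWordType, PySem.Chars.startswith (s.drop i.toNat) wt.1.toList = true ∧ wt.2 = t := by
  unfold pvScanAt
  exact mem_foldl_add_if pvWordType _ m t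

-- membership after the outer fold over the positions
theorem mem_scan_fold (s : List Char) (R : List Int) (m : PySem.Set String) (t : String) :
    t ∈ R.foldl (pvScanAt s) m ↔
      t ∈ m ∨ ∃ i ∈ R, ∃ wt ∈ pvWordType, PySem.Chars.startswith (s.drop i.toNat) wt.1.toList = true ∧ wt.2 = t := by
  induction R generalizing m with
  | nil => simp
  | cons i0 rest ih =>
    simp only [List.foldl_cons]
    rw [ih, mem_pvScanAt]
    simp only [List.mem_cons]
    constructor
    · rintro ((h | ⟨wt, hwt, hsw, he⟩) | ⟨i, hi, h⟩)
      · exact Or.inl h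
      · exact Or.inr ⟨i0, Or.inl rfl, wt, hwt, hsw, he⟩
      · exact Or.inr ⟨i, Or.inr hi, h⟩
    · rintro (h | ⟨i, (rfl | hi), h⟩)
      · exact Or.inl (Or.inl h)
      · exact Or.inl (Or.inr h)
      · exact Or.inr ⟨i, hi, h⟩

-- a nonempty word starts at some in-range position iff it occurs as a substring
theorem exists_pos_iff_isIn (s : List Char) (w : List Char) (hw : w ≠ []) :
    (∃ i ∈ PySem.List.pyRange 0 s.length 1, PySem.Chars.startswith (s.drop i.toNat) w = true) ↔
      PySem.Chars.isIn w s = true := by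
  rw [← PySem.Chars.exists_prefix_drop_iff_isIn]
  constructor
  · rintro ⟨i, hi, hsw⟩
    exact ⟨i.toNat, (PySem.Chars.startswith_iff _ _).1 hsw⟩
  · rintro ⟨j, hj⟩
    by_cases hlt : j < s.length
    · refine ⟨(j : Int), ?_, (PySem.Chars.startswith_iff _ _).2 (by simpa using hj)⟩
      rw [PySem.List.mem_pyRange_one]
      constructor <;> omega
    · exfalso
      have : s.drop j = [] := List.drop_eq_nil_of_le (by omega)
      rw [this] at hj
      exact hw (List.prefix_nil.1 hj)

-- every word in the table is nonempty
theorem pvWordType_ne_nil : ∀ wt ∈ pvWordType, wt.1.toList ≠ [] := by decide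

-- membership in the matched set = some table word of that type occurs in s
theorem mem_matched (s : List Char) (t : String) :
    t ∈ (PySem.List.pyRange 0 s.length 1).foldl (pvScanAt s) PySem.Set.empty ↔
      ∃ wt ∈ pvWordType, PySem.Chars.isIn wt.1.toList s = true ∧ wt.2 = t := by
  rw [mem_scan_fold]
  constructor
  · rintro (h | ⟨i, hi, wt, hwt, hsw, he⟩)
    · simp [PySem.Set.empty] at h
    · exact ⟨wt, hwt, (exists_pos_iff_isIn s wt.1.toList (pvWordType_ne_nil wt hwt)).1 ⟨i, hi, hsw⟩, he⟩
  · rintro ⟨wt, hwt, hin, he⟩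
    obtain ⟨i, hi, hsw⟩ := (exists_pos_iff_isIn s wt.1.toList (pvWordType_ne_nil wt hwt)).2 hin
    exact Or.inr ⟨i, hi, wt, hwt, hsw, he⟩

-- the Bool the pick loop tests, expressed over the table
theorem contains_matched (s : List Char) (t : String) :
    PySem.Set.contains ((PySem.List.pyRange 0 s.length 1).foldl (pvScanAt s) PySem.Set.empty) t
      = pvWordType.any (fun wt => wt.2 == t && PySem.Chars.isIn wt.1.toList s) := by
  rw [Bool.eq_iff_iff]
  rw [show ∀ (m : PySem.Set String), PySem.Set.contains m t = true ↔ t ∈ m from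
    fun m => by simp [PySem.Set.contains]]
  rw [mem_matched]
  simp only [List.any_eq_true, Bool.and_eq_true, beq_iff_eq]
  constructor
  · rintro ⟨wt, hwt, hin, he⟩; exact ⟨wt, hwt, he, hin⟩
  · rintro ⟨wt, hwt, he, hin⟩; exact ⟨wt, hwt, hin, he⟩

-- ===== VERDICT (by name: the statement is the Claim_ definition above) =====
theorem infer_type_from_name_py_spec : Claim_equal_infer_type_from_name_py := by
  intro p _
  unfold Spec_infer_type_from_name_py infer_type_from_name_py infer_type_from_name_py_alt
  simp only [pvPick, pvTypeOrder, contains_matched, pvWordType, List.any_cons, List.any_nil]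
  simp
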